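-- pv_equiv track=rewrite | github.com/galah92/egtts | src/egtts/example_bank.py | get_pattern_explanation
-- ===== SOURCE A (Python) =====
-- def detect_question_patterns(question: str, hint: str = "") -> list[str]:
--     """
--     Detect SQL patterns needed for a question.
--
--     Returns list of pattern identifiers like:
--     - superlative:highest
--     - comparison:difference
--     - date:year
--     """
--     patterns = []
--     q_lower = question.lower()
--     hint_lower = (hint or "").lower()
--     combined = q_lower + " " + hint_lower
--
--     # Superlative patterns
--     superlative_words = [
--         'highest', 'lowest', 'most', 'least', 'peak', 'maximum', 'minimum',
--         'top', 'bottom', 'largest', 'smallest', 'greatest', 'best', 'worst',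
--     ]
--     for word in superlative_words:
--         if word in q_lower:
--             patterns.append(f"superlative:{word}")
--
--     # Comparison/ratio patterns
--     if 'ratio' in q_lower:
--         patterns.append("comparison:ratio")
--     if 'difference' in q_lower or 'more than' in q_lower or 'less than' in q_lower:
--         patterns.append("comparison:difference")
--     if 'compare' in q_lower or 'versus' in q_lower:
--         patterns.append("comparison:compare")
--
--     # Date patterns
--     if any(year in combined for year in ['2012', '2013', '2014']):
--         patterns.append("date:year")
--     if 'month' in combined:
--         patterns.append("date:month")
--
--     # Aggregation patterns
--     if 'total' in q_lower or 'sum' in q_lower: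
--         patterns.append("aggregate:sum")
--     if 'how many' in q_lower or 'count' in q_lower:
--         patterns.append("aggregate:count")
--     if 'average' in q_lower:
--         patterns.append("aggregate:avg")
--
--     return patterns
--
-- def get_pattern_explanation(question: str, hint: str = "") -> str:
--     """
--     Generate a brief explanation of what SQL pattern is likely needed.
--
--     This can be prepended to the prompt to prime the model.
--     """
--     patterns = detect_question_patterns(question, hint)
--
--     explanations = []
--
--     if any('superlative' in p for p in patterns):
--         explanations.append(
--             "This is a superlative question (highest/lowest/most/least). "
--             "Use: GROUP BY [entity], ORDER BY SUM/COUNT([measure]) DESC/ASC, LIMIT 1"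
--         )
--
--     if any('comparison' in p for p in patterns):
--         explanations.append(
--             "This involves comparing values. "
--             "Use CASE WHEN inside SUM() to compute each side, then subtract."
--         )
--
--     if any('date' in p for p in patterns):
--         explanations.append(
--             "Dates are YYYYMMDD strings. "
--             "Use SUBSTR(Date, 1, 4) for year, SUBSTR(Date, 5, 2) for month."
--         )
--
--     return " ".join(explanations) if explanations else ""
-- ===== SOURCE B (Python) =====
-- SUPERLATIVE_WORDS = (
--     'highest', 'lowest', 'most', 'least', 'peak', 'maximum', 'minimum',
--     'top', 'bottom', 'largest', 'smallest', 'greatest', 'best', 'worst',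
-- )
--
-- COMPARISON_WORDS = ('ratio', 'difference', 'more than', 'less than', 'compare', 'versus')
--
--
-- def get_pattern_explanation(question: str, hint: str = "") -> str:
--     """Direct boolean checks; skips building the intermediate pattern list."""
--     q = question.lower()
--     combined = q + " " + hint.lower()
--     has_sup = any(w in q for w in SUPERLATIVE_WORDS)
--     has_cmp = any(w in q for w in COMPARISON_WORDS)
--     has_date = any(y in combined for y in ('2012', '2013', '2014')) or 'month' in combined
--     parts = (
--         (["This is a superlative question (highest/lowest/most/least). "
--           "Use: GROUP BY [entity], ORDER BY SUM/COUNT([measure]) DESC/ASC, LIMIT 1"] if has_sup else [])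
--         + (["This involves comparing values. "
--             "Use CASE WHEN inside SUM() to compute each side, then subtract."] if has_cmp else [])
--         + (["Dates are YYYYMMDD strings. "
--             "Use SUBSTR(Date, 1, 4) for year, SUBSTR(Date, 5, 2) for month."] if has_date else [])
--     )
--     return " ".join(parts)
-- ===== Notes on version B (the rewrite author's own statement) =====
-- stated objective: simpler
-- what changed: B drops detect_question_patterns and the intermediate pattern-identifier list entirely: it computes the three booleans (superlative/comparison/date) directly by substring tests and joins the corresponding fixed explanation strings, instead of building a tagged pattern list and re-scanning it with substring queries.
import Mathlib
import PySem

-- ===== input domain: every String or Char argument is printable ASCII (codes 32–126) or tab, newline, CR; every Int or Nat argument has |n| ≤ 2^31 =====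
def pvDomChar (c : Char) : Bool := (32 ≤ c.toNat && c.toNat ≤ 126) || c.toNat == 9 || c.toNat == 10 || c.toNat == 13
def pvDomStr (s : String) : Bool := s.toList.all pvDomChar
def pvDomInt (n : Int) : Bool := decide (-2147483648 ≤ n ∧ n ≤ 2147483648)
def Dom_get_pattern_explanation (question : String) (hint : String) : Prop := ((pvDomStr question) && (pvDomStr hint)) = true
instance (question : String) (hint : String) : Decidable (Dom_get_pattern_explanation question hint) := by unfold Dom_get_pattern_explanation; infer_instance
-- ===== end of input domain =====

-- B drops the intermediate pattern-identifier list of detect_question_patterns entirely and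
-- computes the three booleans (superlative/comparison/date) directly, joining the fixed
-- explanation strings (objective: simpler; same asymptotic cost).

-- ===== PORT A =====
def aSuperlativeWords : List String :=
  ["highest", "lowest", "most", "least", "peak", "maximum", "minimum",
   "top", "bottom", "largest", "smallest", "greatest", "best", "worst"]

def detect_question_patterns (question : String) (hint : String) : List String :=
  let q_lower := PySem.Str.lower question
  let hint_lower := PySem.Str.lower (if hint == "" then "" else hint)
  let combined := q_lower ++ " " ++ hint_lower
  let patterns : List String :=
    aSuperlativeWords.foldl
      (fun acc w => if PySem.Str.isIn w q_lower then acc ++ ["superlative:" ++ w] else acc) []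
  let patterns := if PySem.Str.isIn "ratio" q_lower then patterns ++ ["comparison:ratio"] else patterns
  let patterns := if PySem.Str.isIn "difference" q_lower || PySem.Str.isIn "more than" q_lower || PySem.Str.isIn "less than" q_lower
    then patterns ++ ["comparison:difference"] else patterns
  let patterns := if PySem.Str.isIn "compare" q_lower || PySem.Str.isIn "versus" q_lower
    then patterns ++ ["comparison:compare"] else patterns
  let patterns := if (["2012", "2013", "2014"] : List String).any (fun year => PySem.Str.isIn year combined)
    then patterns ++ ["date:year"] else patterns
  let patterns := if PySem.Str.isIn "month" combined then patterns ++ ["date:month"] else patterns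
  let patterns := if PySem.Str.isIn "total" q_lower || PySem.Str.isIn "sum" q_lower
    then patterns ++ ["aggregate:sum"] else patterns
  let patterns := if PySem.Str.isIn "how many" q_lower || PySem.Str.isIn "count" q_lower
    then patterns ++ ["aggregate:count"] else patterns
  let patterns := if PySem.Str.isIn "average" q_lower then patterns ++ ["aggregate:avg"] else patterns
  patterns


def expSuperlative : String :=
  "This is a superlative question (highest/lowest/most/least). Use: GROUP BY [entity], ORDER BY SUM/COUNT([measure]) DESC/ASC, LIMIT 1"
def expComparison : String :=
  "This involves comparing values. Use CASE WHEN inside SUM() to compute each side, then subtract."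
def expDate : String :=
  "Dates are YYYYMMDD strings. Use SUBSTR(Date, 1, 4) for year, SUBSTR(Date, 5, 2) for month."

def get_pattern_explanation (question : String) (hint : String) : String :=
  let patterns := detect_question_patterns question hint
  let explanations : List String := []
  let explanations := if patterns.any (fun p => PySem.Str.isIn "superlative" p)
    then explanations ++ [expSuperlative] else explanations
  let explanations := if patterns.any (fun p => PySem.Str.isIn "comparison" p)
    then explanations ++ [expComparison] else explanations
  let explanations := if patterns.any (fun p => PySem.Str.isIn "date" p)
    then explanations ++ [expDate] else explanations
  if !explanations.isEmpty then PySem.Str.join " " explanations else ""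

-- ===== PORT B =====
def bSuperlativeWords : List String :=
  ["highest", "lowest", "most", "least", "peak", "maximum", "minimum",
   "top", "bottom", "largest", "smallest", "greatest", "best", "worst"]
def bComparisonWords : List String :=
  ["ratio", "difference", "more than", "less than", "compare", "versus"]

def get_pattern_explanation_alt (question : String) (hint : String) : String :=
  let q := PySem.Str.lower question
  let combined := q ++ " " ++ PySem.Str.lower hint
  let hasSup := bSuperlativeWords.any (fun w => PySem.Str.isIn w q)
  let hasCmp := bComparisonWords.any (fun w => PySem.Str.isIn w q)
  let hasDate := (["2012", "2013", "2014"] : List String).any (fun y => PySem.Str.isIn y combined)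
    || PySem.Str.isIn "month" combined
  PySem.Str.join " "
    ((if hasSup then [expSuperlative] else [])
      ++ (if hasCmp then [expComparison] else [])
      ++ (if hasDate then [expDate] else []))


-- ===== PRECONDITION & SPEC =====
def Spec_get_pattern_explanation (question : String) (hint : String) (out : String) : Prop := out = get_pattern_explanation_alt question hint
instance (question : String) (hint : String) (out : String) : Decidable (Spec_get_pattern_explanation question hint out) := by unfold Spec_get_pattern_explanation; infer_instance

-- ===== CLAIM (what is proved, stated in full; the proofs are below) =====
def Claim_equal_get_pattern_explanation : Prop := ∀ (question : String) (hint : String), Dom_get_pattern_explanation question hint → Spec_get_pattern_explanation question hint (get_pattern_explanation question hint)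

-- ===== LEMMAS AND PROOFS =====

theorem any_filter_true {α : Type} (l : List α) (p : α → Bool) :
    (l.filter p).any (fun _ => true) = l.any p := by
  induction l with
  | nil => rfl
  | cons a t ih => simp only [List.filter_cons]; cases h : p a <;> simp [h, ih]
theorem hint_ite (hint : String) : (if hint == "" then "" else hint) = hint := by
  by_cases h : hint = "" <;> simp [h]

theorem any_ite_append {α : Type} (c : Bool) (l t : List α) (p : α → Bool) :
    (if c then l ++ t else l).any p = (l.any p || (c && t.any p)) := by
  cases c <;> simp

theorem isin_superlative_comparison_ratio : PySem.Str.isIn "superlative" "comparison:ratio" = false := by decide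
theorem isin_superlative_comparison_difference : PySem.Str.isIn "superlative" "comparison:difference" = false := by decide
theorem isin_superlative_comparison_compare : PySem.Str.isIn "superlative" "comparison:compare" = false := by decide
theorem isin_superlative_date_year : PySem.Str.isIn "superlative" "date:year" = false := by decide
theorem isin_superlative_date_month : PySem.Str.isIn "superlative" "date:month" = false := by decide
theorem isin_superlative_aggregate_sum : PySem.Str.isIn "superlative" "aggregate:sum" = false := by decide
theorem isin_superlative_aggregate_count : PySem.Str.isIn "superlative" "aggregate:count" = false := by decide
theorem isin_superlative_aggregate_avg : PySem.Str.isIn "superlative" "aggregate:avg" = false := by decide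
theorem isin_comparison_comparison_ratio : PySem.Str.isIn "comparison" "comparison:ratio" = true := by decide
theorem isin_comparison_comparison_difference : PySem.Str.isIn "comparison" "comparison:difference" = true := by decide
theorem isin_comparison_comparison_compare : PySem.Str.isIn "comparison" "comparison:compare" = true := by decide
theorem isin_comparison_date_year : PySem.Str.isIn "comparison" "date:year" = false := by decide
theorem isin_comparison_date_month : PySem.Str.isIn "comparison" "date:month" = false := by decide
theorem isin_comparison_aggregate_sum : PySem.Str.isIn "comparison" "aggregate:sum" = false := by decide
theorem isin_comparison_aggregate_count : PySem.Str.isIn "comparison" "aggregate:count" = false := by decide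
theorem isin_comparison_aggregate_avg : PySem.Str.isIn "comparison" "aggregate:avg" = false := by decide
theorem isin_date_comparison_ratio : PySem.Str.isIn "date" "comparison:ratio" = false := by decide
theorem isin_date_comparison_difference : PySem.Str.isIn "date" "comparison:difference" = false := by decide
theorem isin_date_comparison_compare : PySem.Str.isIn "date" "comparison:compare" = false := by decide
theorem isin_date_date_year : PySem.Str.isIn "date" "date:year" = true := by decide
theorem isin_date_date_month : PySem.Str.isIn "date" "date:month" = true := by decide
theorem isin_date_aggregate_sum : PySem.Str.isIn "date" "aggregate:sum" = false := by decide
theorem isin_date_aggregate_count : PySem.Str.isIn "date" "aggregate:count" = false := by decide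
theorem isin_date_aggregate_avg : PySem.Str.isIn "date" "aggregate:avg" = false := by decide

theorem sup_map_any2 (ql : String) :
    ((List.map (HAppend.hAppend "superlative:")
        (List.filter (fun w => PySem.Str.isIn w ql) aSuperlativeWords)).any
      (fun p => PySem.Str.isIn "superlative" p))
      = aSuperlativeWords.any (fun w => PySem.Str.isIn w ql) := by
  rw [List.any_map, PySem.List.any_congr_mem (g := fun _ => true) ?_, any_filter_true]
  intro x hx
  have hx' := List.mem_of_mem_filter hx
  fin_cases hx' <;> decide

theorem sup_map_none (ql : String) (needle : String)
    (h : ∀ w ∈ aSuperlativeWords, PySem.Str.isIn needle ("superlative:" ++ w) = false) :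
    ((List.map (HAppend.hAppend "superlative:")
        (List.filter (fun w => PySem.Str.isIn w ql) aSuperlativeWords)).any
      (fun p => PySem.Str.isIn needle p)) = false := by
  rw [List.any_map, PySem.List.any_congr_mem (g := fun _ => false)]
  · simp
  · intro x hx
    simpa using h x (List.mem_of_mem_filter hx)

theorem anyS (q h : String) :
    (detect_question_patterns q h).any (fun p => PySem.Str.isIn "superlative" p)
      = aSuperlativeWords.any (fun w => PySem.Str.isIn w (PySem.Str.lower q)) := by
  simp only [detect_question_patterns, hint_ite]
  rw [PySem.List.foldl_append_if]
  simp only [List.nil_append, any_ite_append, List.any_cons, List.any_nil,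
    isin_superlative_comparison_ratio, isin_superlative_comparison_difference, isin_superlative_comparison_compare, isin_superlative_date_year, isin_superlative_date_month, isin_superlative_aggregate_sum, isin_superlative_aggregate_count, isin_superlative_aggregate_avg,
    Bool.or_false, Bool.and_false]
  exact sup_map_any2 _

theorem anyC (q h : String) :
    (detect_question_patterns q h).any (fun p => PySem.Str.isIn "comparison" p)
      = (PySem.Str.isIn "ratio" (PySem.Str.lower q) || PySem.Str.isIn "difference" (PySem.Str.lower q)
        || PySem.Str.isIn "more than" (PySem.Str.lower q) || PySem.Str.isIn "less than" (PySem.Str.lower q)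
        || PySem.Str.isIn "compare" (PySem.Str.lower q) || PySem.Str.isIn "versus" (PySem.Str.lower q)) := by
  simp only [detect_question_patterns, hint_ite]
  rw [PySem.List.foldl_append_if]
  simp only [List.nil_append, any_ite_append, List.any_cons, List.any_nil,
    isin_comparison_comparison_ratio, isin_comparison_comparison_difference, isin_comparison_comparison_compare, isin_comparison_date_year, isin_comparison_date_month, isin_comparison_aggregate_sum, isin_comparison_aggregate_count, isin_comparison_aggregate_avg,
    sup_map_none _ "comparison" (by intro w hw; fin_cases hw <;> decide),
    Bool.or_false, Bool.and_false, Bool.and_true, Bool.false_or, Bool.or_assoc]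

theorem anyD (q h : String) :
    (detect_question_patterns q h).any (fun p => PySem.Str.isIn "date" p)
      = ((["2012", "2013", "2014"] : List String).any
          (fun y => PySem.Str.isIn y (PySem.Str.lower q ++ " " ++ PySem.Str.lower h))
        || PySem.Str.isIn "month" (PySem.Str.lower q ++ " " ++ PySem.Str.lower h)) := by
  simp only [detect_question_patterns, hint_ite]
  rw [PySem.List.foldl_append_if]
  simp only [List.nil_append, any_ite_append, List.any_cons, List.any_nil,
    isin_date_comparison_ratio, isin_date_comparison_difference, isin_date_comparison_compare, isin_date_date_year, isin_date_date_month, isin_date_aggregate_sum, isin_date_aggregate_count, isin_date_aggregate_avg,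
    sup_map_none _ "date" (by intro w hw; fin_cases hw <;> decide),
    Bool.or_false, Bool.and_false, Bool.and_true, Bool.false_or, Bool.or_assoc]
theorem main_lemma (question hint : String) :
    get_pattern_explanation question hint = get_pattern_explanation_alt question hint := by
  simp only [get_pattern_explanation, get_pattern_explanation_alt]
  rw [anyS, anyC, anyD]
  simp only [aSuperlativeWords, bSuperlativeWords, bComparisonWords,
    List.any_cons, List.any_nil, Bool.or_false, Bool.or_assoc, List.nil_append]
  generalize (PySem.Str.isIn "highest" (PySem.Str.lower question) ||
    (PySem.Str.isIn "lowest" (PySem.Str.lower question) ||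
    (PySem.Str.isIn "most" (PySem.Str.lower question) ||
    (PySem.Str.isIn "least" (PySem.Str.lower question) ||
    (PySem.Str.isIn "peak" (PySem.Str.lower question) ||
    (PySem.Str.isIn "maximum" (PySem.Str.lower question) ||
    (PySem.Str.isIn "minimum" (PySem.Str.lower question) ||
    (PySem.Str.isIn "top" (PySem.Str.lower question) ||
    (PySem.Str.isIn "bottom" (PySem.Str.lower question) ||
    (PySem.Str.isIn "largest" (PySem.Str.lower question) ||
    (PySem.Str.isIn "smallest" (PySem.Str.lower question) ||
    (PySem.Str.isIn "greatest" (PySem.Str.lower question) ||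
    (PySem.Str.isIn "best" (PySem.Str.lower question) ||
    PySem.Str.isIn "worst" (PySem.Str.lower question)))))))))))))) = S
  generalize (PySem.Str.isIn "ratio" (PySem.Str.lower question) ||
    (PySem.Str.isIn "difference" (PySem.Str.lower question) ||
    (PySem.Str.isIn "more than" (PySem.Str.lower question) ||
    (PySem.Str.isIn "less than" (PySem.Str.lower question) ||
    (PySem.Str.isIn "compare" (PySem.Str.lower question) ||
    PySem.Str.isIn "versus" (PySem.Str.lower question)))))) = C
  generalize (PySem.Str.isIn "2012" (PySem.Str.lower question ++ " " ++ PySem.Str.lower hint) ||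
    (PySem.Str.isIn "2013" (PySem.Str.lower question ++ " " ++ PySem.Str.lower hint) ||
    (PySem.Str.isIn "2014" (PySem.Str.lower question ++ " " ++ PySem.Str.lower hint) ||
    PySem.Str.isIn "month" (PySem.Str.lower question ++ " " ++ PySem.Str.lower hint)))) = D
  cases S <;> cases C <;> cases D <;> (simp; try rfl)

-- ===== VERDICT (by name: the statement is the Claim_ definition above) =====
theorem get_pattern_explanation_spec : Claim_equal_get_pattern_explanation := by
  intro question hint _
  unfold Spec_get_pattern_explanation
  exact main_lemma question hint
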